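-- pv_equiv track=rewrite | github.com/andrescortesg/decoHTS | decoHTS.py | crunch_array
-- ===== SOURCE A (Python) =====
-- def crunch_array(arr):
--     count = 0
--     num = 0
--     num_arr = []
--     for i in arr:
--         num = num + int(i)
--         count = count + 1
--         if count == 3:
--             num_arr.append(num)
--             count = num = 0
--     return num_arr
-- ===== SOURCE B (Python) =====
-- def crunch_array(arr):
--     arr = list(arr)
--     n = len(arr) - len(arr) % 3
--     return [sum(int(x) for x in arr[i:i+3]) for i in range(0, n, 3)]
-- ===== Notes on version B (the rewrite author's own statement) =====
-- stated objective: alternative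
-- what changed: Replaces A's single accumulating pass with a counter/running-sum/reset state by a comprehension over the start indices of the complete triples (len - len % 3), summing each 3-element slice.
import Mathlib
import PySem

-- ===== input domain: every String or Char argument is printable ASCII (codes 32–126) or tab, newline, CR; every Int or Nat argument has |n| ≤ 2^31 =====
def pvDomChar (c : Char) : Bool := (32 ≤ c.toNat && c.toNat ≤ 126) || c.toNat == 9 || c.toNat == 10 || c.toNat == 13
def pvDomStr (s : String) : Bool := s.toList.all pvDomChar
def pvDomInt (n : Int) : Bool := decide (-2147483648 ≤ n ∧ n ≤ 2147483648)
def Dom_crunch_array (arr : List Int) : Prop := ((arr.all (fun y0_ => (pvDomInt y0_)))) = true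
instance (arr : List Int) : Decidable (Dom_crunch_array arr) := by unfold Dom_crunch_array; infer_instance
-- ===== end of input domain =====

-- B replaces A's single accumulating loop (counter + running sum + reset) by an iteration
-- over the start indices of the complete triples, summing each 3-element slice; same O(n) cost.

-- ===== PORT A =====
-- one loop step of A: num += i; count += 1; if count == 3 then append and reset both
def crunchStep (s : Int × Int × List Int) (i : Int) : Int × Int × List Int :=
  let num := s.2.1 + i
  let count := s.1 + 1
  if count = 3 then (0, 0, s.2.2 ++ [num]) else (count, num, s.2.2)

def crunch_array (arr : List Int) : List Int :=
  (arr.foldl crunchStep (0, 0, ([] : List Int))).2.2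

-- ===== PORT B =====
-- n = len(arr) - len(arr) % 3; [sum(arr[i:i+3]) for i in range(0, n, 3)]
def crunch_array_alt (arr : List Int) : List Int :=
  let n : Int := (arr.length : Int) - PySem.Int.mod (arr.length : Int) 3
  (PySem.List.pyRange 0 n 3).map
    (fun i => (PySem.List.slice arr (some i) (some (i + 3))).foldl (· + ·) 0)

-- ===== PRECONDITION & SPEC =====
def Spec_crunch_array (arr : List Int) (out : List Int) : Prop := out = crunch_array_alt arr
instance (arr : List Int) (out : List Int) : Decidable (Spec_crunch_array arr out) := by unfold Spec_crunch_array; infer_instance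

-- ===== CLAIM (what is proved, stated in full; the proofs are below) =====
def Claim_equal_crunch_array : Prop := ∀ (arr : List Int), Dom_crunch_array arr → Spec_crunch_array arr (crunch_array arr)

-- ===== LEMMAS AND PROOFS =====

-- proof-only middle form: sum three at a time, structurally
def rec3 : List Int → List Int
  | a :: b :: c :: rest => (a + b + c) :: rec3 rest
  | _ => []

-- Loop invariant for A: folding A's step from a fresh (count = 0, num = 0) state appends
-- exactly rec3's result to whatever output is already accumulated.
theorem crunch_foldl_eq (arr : List Int) :
    ∀ acc : List Int, (List.foldl crunchStep (0, 0, acc) arr).2.2 = acc ++ rec3 arr := by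
  induction arr using rec3.induct with
  | case1 a b c rest ih =>
      intro acc
      simp only [List.foldl, crunchStep]
      norm_num
      rw [ih (acc ++ [a + b + c])]
      simp [rec3, List.append_assoc]
  | case2 arr h =>
      intro acc
      rcases arr with _ | ⟨a, _ | ⟨b, _ | ⟨c, rest⟩⟩⟩
      · simp [rec3]
      · simp [List.foldl, crunchStep, rec3]
      · simp [List.foldl, crunchStep, rec3]
      · exact absurd rfl (h a b c rest)

theorem pyRange3 (m : Nat) :
    PySem.List.pyRange 0 (3 * (m : Int)) 3 = (List.range m).map (fun (k : Nat) => 3 * (k : Int)) := by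
  rw [PySem.List.pyRange_of_pos _ _ (by norm_num)]
  have hc : (if (0 : Int) < 3 * (m : Int) then ((3 * (m : Int) - 0 + 3 - 1) / 3).toNat else 0) = m := by
    split_ifs with h
    · have e : (3 * (m : Int) - 0 + 3 - 1) = 2 + (m : Int) * 3 := by ring
      rw [e, Int.add_mul_ediv_right _ _ (by norm_num)]
      norm_num
    · omega
  rw [hc]
  simp only [zero_add]

-- B's index comprehension computes rec3
theorem alt_eq_rec3 (arr : List Int) : crunch_array_alt arr = rec3 arr := by
  have hn : (arr.length : Int) - PySem.Int.mod (arr.length : Int) 3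
      = 3 * ((arr.length / 3 : Nat) : Int) := by
    simp only [PySem.Int.mod]
    rw [Int.fmod_eq_emod]
    have : (0 : Int) ≤ 3 ∨ (3 : Int) ∣ (arr.length : Int) := Or.inl (by norm_num)
    rw [if_pos this]
    push_cast
    omega
  unfold crunch_array_alt
  show (PySem.List.pyRange 0 ((arr.length : Int) - PySem.Int.mod (arr.length : Int) 3) 3).map
      (fun i => (PySem.List.slice arr (some i) (some (i + 3))).foldl (· + ·) 0) = rec3 arr
  rw [hn, pyRange3, List.map_map]
  clear hn
  induction arr using rec3.induct with
  | case1 a b c rest ih =>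
      have hlen : (a :: b :: c :: rest).length / 3 = rest.length / 3 + 1 := by
        simp [List.length]; omega
      rw [hlen, List.range_succ_eq_map, List.map_cons, List.map_map]
      have hhead : (3 * ((0 : Nat) : Int)) + 3 = 3 := by norm_num
      have h0 : PySem.List.slice (a :: b :: c :: rest) (some (3 * ((0 : Nat) : Int)))
          (some (3 * ((0 : Nat) : Int) + 3)) = [a, b, c] := by
        rw [PySem.List.slice_toNat _ (by positivity) (by positivity)]
        norm_num
        rfl
      have htail : ∀ k ∈ List.range (rest.length / 3),
          (((fun i => (PySem.List.slice (a :: b :: c :: rest) (some i) (some (i + 3))).foldl (· + ·) 0)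
            ∘ (fun k : Nat => 3 * (k : Int))) ∘ Nat.succ) k
          = ((fun i => (PySem.List.slice rest (some i) (some (i + 3))).foldl (· + ·) 0)
            ∘ (fun k : Nat => 3 * (k : Int))) k := by
        intro k _
        simp only [Function.comp]
        have h1 : PySem.List.slice (a :: b :: c :: rest) (some (3 * ((Nat.succ k : Nat) : Int)))
            (some (3 * ((Nat.succ k : Nat) : Int) + 3))
            = PySem.List.slice rest (some (3 * (k : Int))) (some (3 * (k : Int) + 3)) := by
          rw [PySem.List.slice_toNat _ (by positivity) (by positivity),
              PySem.List.slice_toNat _ (by positivity) (by positivity)]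
          have e1 : (3 * ((Nat.succ k : Nat) : Int)).toNat = 3 * k + 3 := by push_cast; omega
          have e2 : (3 * ((Nat.succ k : Nat) : Int) + 3).toNat = 3 * k + 6 := by push_cast; omega
          have e3 : (3 * ((k : Nat) : Int)).toNat = 3 * k := by omega
          have e4 : (3 * ((k : Nat) : Int) + 3).toNat = 3 * k + 3 := by omega
          rw [e1, e2, e3, e4]
          have hdrop : List.drop (3 * k + 3) (a :: b :: c :: rest) = List.drop (3 * k) rest := by
            show List.drop (3 * k + 3) (a :: b :: c :: rest) = _
            have : 3 * k + 3 = 3 + (3 * k) := by omega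
            rw [this, ← List.drop_drop]
            rfl
          rw [hdrop]
          congr 1
          omega
        rw [h1]
      rw [List.map_congr_left htail]
      simp only [Function.comp] at ih ⊢
      rw [ih]
      simp only [rec3, h0]
      norm_num [List.foldl]
  | case2 arr h =>
      rcases arr with _ | ⟨a, _ | ⟨b, _ | ⟨c, rest⟩⟩⟩
      · simp [rec3]
      · simp [rec3]
      · simp [rec3]
      · exact absurd rfl (h a b c rest)

-- ===== VERDICT (by name: the statement is the Claim_ definition above) =====
theorem crunch_array_spec : Claim_equal_crunch_array := by
  intro arr _
  unfold Spec_crunch_array crunch_array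
  rw [alt_eq_rec3]
  simpa using crunch_foldl_eq arr []
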